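-- pv_equiv track=rewrite | github.com/Katafotic/BioinformaticsCourse2024 | GRPH/GRPH.py | find_overlap_adjacency_list
-- ===== SOURCE A (Python) =====
-- def find_overlap_adjacency_list(sequences, k=3):
--     adjacency_list = []
--
--     for id1, seq1 in sequences.items():
--         suffix = seq1[-k:]
--         for id2, seq2 in sequences.items():
--             if id1 != id2 and seq2.startswith(suffix):
--                 adjacency_list.append((id1, id2))
--
--     return adjacency_list
-- ===== SOURCE B (Python) =====
-- def find_overlap_adjacency_list(sequences, k=3):
--     items = list(sequences.items())
--     suffixes = [(id1, seq1[-k:]) for id1, seq1 in items]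
--     lengths = set(len(s) for _, s in suffixes)
--     index = {}
--     for l in lengths:
--         buckets = {}
--         for id2, seq2 in items:
--             buckets.setdefault(seq2[:l], []).append(id2)
--         index[l] = buckets
--     adjacency_list = []
--     for id1, suffix in suffixes:
--         for id2 in index[len(suffix)].get(suffix, []):
--             if id2 != id1:
--                 adjacency_list.append((id1, id2))
--     return adjacency_list
-- ===== Notes on version B (the rewrite author's own statement) =====
-- stated objective: faster
-- what changed: Replaces the all-pairs scan (for every sequence, test every other sequence's prefix against its suffix) by a prefix index: per needed suffix length a dict from length-l prefix to the ids bearing it, built in one pass, so each sequence does one hash lookup instead of an inner scan.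
import Mathlib
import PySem

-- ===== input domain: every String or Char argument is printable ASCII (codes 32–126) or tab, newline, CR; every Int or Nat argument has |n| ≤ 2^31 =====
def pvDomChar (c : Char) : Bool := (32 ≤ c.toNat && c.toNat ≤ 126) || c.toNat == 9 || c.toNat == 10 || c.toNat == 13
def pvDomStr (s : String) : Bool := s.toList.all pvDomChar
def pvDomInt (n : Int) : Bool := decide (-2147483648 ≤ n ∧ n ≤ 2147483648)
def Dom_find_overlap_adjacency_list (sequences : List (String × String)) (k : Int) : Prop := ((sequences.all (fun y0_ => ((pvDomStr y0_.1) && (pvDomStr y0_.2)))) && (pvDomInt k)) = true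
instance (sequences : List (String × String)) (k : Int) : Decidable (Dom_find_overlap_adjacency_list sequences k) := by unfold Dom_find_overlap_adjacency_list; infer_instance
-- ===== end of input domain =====

-- B replaces A's quadratic all-pairs suffix/prefix scan by a per-length prefix index
-- (a dict of buckets), looked up once per sequence; same return value, same order.

-- ===== PORT A =====
-- for id1, seq1: suffix = seq1[-k:]; for id2, seq2: if id1 != id2 and seq2.startswith(suffix): append (id1, id2)
def find_overlap_adjacency_list (sequences : List (String × String)) (k : Int) : List (String × String) :=
  sequences.foldl (fun acc p =>
    let suffix := PySem.Str.slice p.2 (some (-k)) none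
    sequences.foldl (fun acc2 q =>
      if p.1 != q.1 && PySem.Str.startswith q.2 suffix then acc2 ++ [(p.1, q.1)] else acc2) acc) []

-- ===== PORT B =====
-- buckets for one prefix length l: seq2[:l] -> list of ids (insertion order);
-- buckets.setdefault(seq2[:l], []).append(id2) is Dict.modify with default []
def pvBuckets (sequences : List (String × String)) (l : Int) : PySem.Dict String (List String) :=
  sequences.foldl (fun d q => d.modify (PySem.Str.slice q.2 none (some l)) [] (· ++ [q.1])) PySem.Dict.empty

def find_overlap_adjacency_list_alt (sequences : List (String × String)) (k : Int) : List (String × String) :=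
  let suffixes := sequences.map (fun p => (p.1, PySem.Str.slice p.2 (some (-k)) none))
  let lengths := PySem.Set.ofList (suffixes.map (fun q => PySem.Str.len q.2))
  let index := lengths.foldl (fun d l => d.insert l (pvBuckets sequences l)) PySem.Dict.empty
  -- index[len(suffix)] never raises in Source B (the key is in lengths by construction), so getD's default is never used
  suffixes.foldl (fun acc q =>
    ((index.getD (PySem.Str.len q.2) PySem.Dict.empty).getD q.2 []).foldl
      (fun acc2 id2 => if id2 != q.1 then acc2 ++ [(q.1, id2)] else acc2) acc) []

-- ===== PRECONDITION & SPEC =====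
def Spec_find_overlap_adjacency_list (sequences : List (String × String)) (k : Int) (out : List (String × String)) : Prop := out = find_overlap_adjacency_list_alt sequences k
instance (sequences : List (String × String)) (k : Int) (out : List (String × String)) : Decidable (Spec_find_overlap_adjacency_list sequences k out) := by unfold Spec_find_overlap_adjacency_list; infer_instance

-- ===== CLAIM (what is proved, stated in full; the proofs are below) =====
def Claim_equal_find_overlap_adjacency_list : Prop := ∀ (sequences : List (String × String)) (k : Int), Dom_find_overlap_adjacency_list sequences k → Spec_find_overlap_adjacency_list sequences k (find_overlap_adjacency_list sequences k)

-- ===== LEMMAS AND PROOFS =====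

-- a fold of inserts whose value is determined by the key: lookup is key-determined
theorem getD_foldl_insert_keyfun {κ ν : Type} [BEq κ] [LawfulBEq κ] [DecidableEq κ]
    (xs : List κ) (F : κ → ν) (d : PySem.Dict κ ν) (c : κ) (dflt : ν) :
    (xs.foldl (fun d l => d.insert l (F l)) d).getD c dflt
      = if c ∈ xs then F c else d.getD c dflt := by
  induction xs generalizing d with
  | nil => simp
  | cons x xs ih =>
    simp only [List.foldl_cons, ih, PySem.Dict.getD_insert, List.mem_cons]
    by_cases hc : c = x <;> by_cases hm : c ∈ xs <;> simp [hc, hm]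

-- the bucket-building loop groups ids by seq2[:l]
theorem getD_buckets_loop (l : Int) (seqs : List (String × String))
    (d : PySem.Dict String (List String)) (c : String) :
    (seqs.foldl (fun d q => d.modify (PySem.Str.slice q.2 none (some l)) [] (· ++ [q.1])) d).getD c []
      = d.getD c [] ++ (seqs.filter (fun q => PySem.Str.slice q.2 none (some l) == c)).map (·.1) := by
  induction seqs generalizing d with
  | nil => simp
  | cons x xs ih =>
    simp only [List.foldl_cons, ih, List.filter_cons]
    rw [PySem.Dict.getD_modify]
    by_cases hc : c = PySem.Str.slice x.2 none (some l)
    · simp [hc]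
    · have hb : (PySem.Str.slice x.2 none (some l) == c) = false :=
        beq_eq_false_iff_ne.mpr (fun e => hc e.symm)
      simp [hc, hb]

theorem getD_pvBuckets (sequences : List (String × String)) (l : Int) (c : String) :
    (pvBuckets sequences l).getD c []
      = ((sequences.filter (fun q => PySem.Str.slice q.2 none (some l) == c)).map (·.1)) := by
  unfold pvBuckets
  rw [getD_buckets_loop]
  simp

theorem string_toList_inj (s t : String) : s.toList = t.toList ↔ s = t :=
  ⟨fun h => by simpa using congrArg String.ofList h, fun h => by rw [h]⟩

-- seq2.startswith(s) is "the length-|s| prefix slice of seq2 equals s"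
theorem startswith_eq_slice_beq (s q : String) :
    PySem.Str.startswith q s = (PySem.Str.slice q none (some (PySem.Str.len s)) == s) := by
  rw [PySem.Str.startswith_eq, Bool.eq_iff_iff, PySem.Chars.startswith_iff, beq_iff_eq,
    ← string_toList_inj, PySem.Str.toList_slice, PySem.Chars.slice_eq_listSlice,
    PySem.Str.len_eq, PySem.List.slice_to_natCast, List.prefix_iff_eq_take]
  exact eq_comm

theorem bne_comm_str (a b : String) : (a != b) = (b != a) := by
  rw [Bool.eq_iff_iff]
  simp [bne_iff_ne]
  exact ne_comm

-- the common per-row list both programs produce for one entry p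
def pvRow (sequences : List (String × String)) (k : Int) (p : String × String) : List (String × String) :=
  (sequences.filter (fun q =>
      p.1 != q.1 && PySem.Str.startswith q.2 (PySem.Str.slice p.2 (some (-k)) none))).map
    (fun q => (p.1, q.1))

theorem portA_eq_foldl_row (sequences : List (String × String)) (k : Int) :
    find_overlap_adjacency_list sequences k
      = sequences.foldl (fun acc p => acc ++ pvRow sequences k p) [] := by
  unfold find_overlap_adjacency_list
  refine PySem.List.foldl_congr_mem _ _ _ _ ?_
  intro acc p _
  simp only [PySem.List.foldl_append_if]
  rfl

theorem portB_eq_foldl_row (sequences : List (String × String)) (k : Int) :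
    find_overlap_adjacency_list_alt sequences k
      = sequences.foldl (fun acc p => acc ++ pvRow sequences k p) [] := by
  unfold find_overlap_adjacency_list_alt
  simp only [List.foldl_map]
  refine PySem.List.foldl_congr_mem _ _ _ _ ?_
  intro acc p hp
  rw [getD_foldl_insert_keyfun]
  have hmem : PySem.Str.len (PySem.Str.slice p.2 (some (-k)) none)
      ∈ PySem.Set.ofList ((sequences.map (fun p => (p.1, PySem.Str.slice p.2 (some (-k)) none))).map
          (fun q => PySem.Str.len q.2)) := by
    rw [PySem.Set.mem_ofList, List.map_map]
    exact List.mem_map_of_mem hp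
  rw [if_pos hmem, getD_pvBuckets]
  simp only [PySem.List.foldl_append_if]
  unfold pvRow
  rw [List.filter_map, List.map_map, List.filter_filter]
  refine congrArg _ (Eq.trans (congrArg _ (List.filter_congr ?_)) rfl)
  intro q _
  simp only [Function.comp_apply]
  rw [startswith_eq_slice_beq, bne_comm_str p.1 q.1]

-- ===== VERDICT (by name: the statement is the Claim_ definition above) =====
theorem find_overlap_adjacency_list_spec : Claim_equal_find_overlap_adjacency_list := by
  intro sequences k _
  show find_overlap_adjacency_list sequences k = find_overlap_adjacency_list_alt sequences k
  rw [portA_eq_foldl_row, portB_eq_foldl_row]
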